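-- pv_equiv track=rewrite | github.com/htcmansi/GFG-TCS-NQT-Sheet | Number Series/Check_number_is_palindrom_or_not.py | isDigitSumPalindrome
-- ===== SOURCE A (Python) =====
-- def isDigitSumPalindrome(N):
--         N_str=str(N)
--         digit_sum=sum(int(digit) for digit in N_str)
--         digit_sum_str=str(digit_sum)
--         reverse_str=digit_sum_str[::-1]
--         if digit_sum_str==reverse_str:
--             return 1
--         else:
--             return 0
-- ===== SOURCE B (Python) =====
-- def isDigitSumPalindrome(N):
--     # purely arithmetic: digit sum by repeated divmod, then numeric digit-reversal
--     n = N
--     s = 0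
--     while n > 0:
--         s += n % 10
--         n //= 10
--     rev = 0
--     m = s
--     while m > 0:
--         rev = rev * 10 + m % 10
--         m //= 10
--     return 1 if rev == s else 0
-- ===== Notes on version B (the rewrite author's own statement) =====
-- stated objective: alternative
-- what changed: B is purely arithmetic: it computes the digit sum by repeated divmod by 10 instead of iterating over str(N), and tests palindromicity by building the numeric digit-reversal (rev = rev*10 + m%10) and comparing it to the sum, instead of A's string reversal and comparison; no strings are built at all.
import Mathlib
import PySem

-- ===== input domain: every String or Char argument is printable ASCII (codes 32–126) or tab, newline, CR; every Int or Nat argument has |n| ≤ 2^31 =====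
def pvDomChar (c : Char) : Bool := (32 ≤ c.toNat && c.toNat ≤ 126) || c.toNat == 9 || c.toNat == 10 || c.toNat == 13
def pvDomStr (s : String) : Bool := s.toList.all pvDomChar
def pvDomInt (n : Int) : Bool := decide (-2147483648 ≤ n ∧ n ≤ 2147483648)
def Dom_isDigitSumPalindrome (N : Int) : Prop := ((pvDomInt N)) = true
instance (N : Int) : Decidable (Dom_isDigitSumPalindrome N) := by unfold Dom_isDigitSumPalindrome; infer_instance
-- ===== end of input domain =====

-- B is purely arithmetic (digit sum by repeated divmod, palindrome test by numeric
-- digit-reversal) where A builds and reverses decimal strings (objective: alternative).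

-- ===== PORT A =====
-- int(digit) is PySem.Int.ofChars? [digit]; `.getD 0` is only the Option default — on every
-- input admitted by Pre_ (0 ≤ N) each character is a digit and ofChars? returns some.
def isDigitSumPalindrome (N : Int) : Int :=
  let N_str : List Char := PySem.Int.toChars N
  let digit_sum : Int := N_str.foldl (fun acc d => acc + (PySem.Int.ofChars? [d]).getD 0) 0
  let digit_sum_str : List Char := PySem.Int.toChars digit_sum
  let reverse_str : List Char := (PySem.List.slice? digit_sum_str none none (-1)).getD []
  if digit_sum_str = reverse_str then 1 else 0

-- ===== PORT B =====
-- Source B's first while loop (s += n % 10; n //= 10); the fuel only makes it total, one unit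
-- per iteration, and n.toNat + 1 always suffices since n strictly decreases.
def pvSumLoop : Nat → Int → Int → Int
  | 0, _, s => s
  | f + 1, n, s =>
      if 0 < n then pvSumLoop f (PySem.Int.floordiv n 10) (s + PySem.Int.mod n 10) else s

-- Source B's second while loop (rev = rev * 10 + m % 10; m //= 10), same fuel discipline.
def pvRevLoop : Nat → Int → Int → Int
  | 0, _, rev => rev
  | f + 1, m, rev =>
      if 0 < m then pvRevLoop f (PySem.Int.floordiv m 10) (rev * 10 + PySem.Int.mod m 10) else rev

def isDigitSumPalindrome_alt (N : Int) : Int :=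
  let s : Int := pvSumLoop (N.toNat + 1) N 0
  let rev : Int := pvRevLoop (s.toNat + 1) s 0
  if rev = s then 1 else 0

-- ===== PRECONDITION & SPEC =====
-- For N < 0, str(N) starts with '-' and int('-') raises ValueError in A.
def Pre_isDigitSumPalindrome (N : Int) : Prop := 0 ≤ N
instance (N : Int) : Decidable (Pre_isDigitSumPalindrome N) := by unfold Pre_isDigitSumPalindrome; infer_instance
def pvWitness_isDigitSumPalindrome : Int := 121

def Spec_isDigitSumPalindrome (N : Int) (out : Int) : Prop := out = isDigitSumPalindrome_alt N
instance (N : Int) (out : Int) : Decidable (Spec_isDigitSumPalindrome N out) := by unfold Spec_isDigitSumPalindrome; infer_instance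

-- ===== CLAIM (what is proved, stated in full; the proofs are below) =====
def Claim_equal_isDigitSumPalindrome : Prop := ∀ (N : Int), Dom_isDigitSumPalindrome N → Pre_isDigitSumPalindrome N → Spec_isDigitSumPalindrome N (isDigitSumPalindrome N)

-- ===== LEMMAS AND PROOFS =====

-- str(m) = the base-10 digits of m (little-endian Nat.digits), rendered and reversed.
theorem toDigits_eq_digits (m : Nat) (hm : 0 < m) :
    Nat.toDigits 10 m = ((Nat.digits 10 m).map Nat.digitChar).reverse := by
  induction m using Nat.strong_induction_on with
  | _ m ih =>
    rcases Nat.lt_or_ge m 10 with h10 | h10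
    · rw [Nat.toDigits_of_lt_base h10, Nat.digits_def' (by norm_num) hm,
        Nat.mod_eq_of_lt h10, Nat.div_eq_of_lt h10]
      simp
    · rw [Nat.toDigits_of_base_le (by norm_num) h10, Nat.digits_def' (by norm_num) hm,
        ih (m / 10) (by omega) (by omega)]
      simp

-- A's generator-sum over str(m) is the sum of the decimal digits of m.
theorem foldl_toDigits_sum (m : Nat) :
    (Nat.toDigits 10 m).foldl (fun acc d => acc + (PySem.Int.ofChars? [d]).getD 0) 0
      = ((Nat.digits 10 m).sum : Int) := by
  have hdv : ∀ d < 10, (PySem.Int.ofChars? [Nat.digitChar d]).getD 0 = (d : Int) := by decide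
  rcases Nat.eq_zero_or_pos m with rfl | hm
  · decide
  · rw [toDigits_eq_digits m hm, PySem.List.foldl_add]
    rw [List.map_reverse, List.sum_reverse, List.map_map]
    have : ((Nat.digits 10 m).map ((fun d => (PySem.Int.ofChars? [d]).getD 0) ∘ Nat.digitChar))
        = (Nat.digits 10 m).map (Nat.cast : Nat → Int) := by
      apply List.map_congr_left
      intro d hd
      exact hdv d (Nat.digits_lt_base (by norm_num) hd)
    rw [this, zero_add]
    exact (Nat.cast_list_sum _).symm

-- B's first loop computes the same digit sum, for any sufficient fuel.
theorem pvSumLoop_eq (fuel : Nat) : ∀ (m : Nat) (s : Int), m < fuel →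
    pvSumLoop fuel (m : Int) s = s + ((Nat.digits 10 m).sum : Int) := by
  induction fuel with
  | zero => intro m s h; exact absurd h (Nat.not_lt_zero m)
  | succ f ih =>
    intro m s h
    rcases Nat.eq_zero_or_pos m with rfl | hm
    · simp [pvSumLoop]
    · rw [pvSumLoop, if_pos (by exact_mod_cast hm),
        PySem.Int.floordiv_eq_ediv_of_pos (by norm_num),
        PySem.Int.mod_eq_emod_of_pos (by norm_num)]
      have h1 : (m : Int) / 10 = ((m / 10 : Nat) : Int) := by omega
      have h2 : (m : Int) % 10 = ((m % 10 : Nat) : Int) := by omega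
      rw [h1, h2, ih (m / 10) _ (by omega), Nat.digits_def' (by norm_num) hm]
      push_cast [List.map_cons, List.sum_cons]
      ring

-- digit sums of numbers admitted by Dom_ are at most 90
theorem digits_sum_le (m : Nat) (hm : m ≤ 2147483648) : (Nat.digits 10 m).sum ≤ 90 := by
  have hlen : (Nat.digits 10 m).length ≤ 10 :=
    (Nat.digits_length_le_iff (by norm_num) m).mpr (by omega)
  have hsum : (Nat.digits 10 m).sum ≤ (Nat.digits 10 m).length • 9 :=
    List.sum_le_card_nsmul _ 9 (fun d hd => by
      have := Nat.digits_lt_base (by norm_num) hd; omega)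
  simp only [smul_eq_mul] at hsum
  omega

-- A's string-palindrome test agrees with B's numeric reversal on every possible digit sum.
theorem pal_iff_rev (s : Nat) (hs : s < 91) :
    (if Nat.toDigits 10 s = (Nat.toDigits 10 s).reverse then (1 : Int) else 0)
      = (if pvRevLoop (((s : Int)).toNat + 1) (s : Int) 0 = (s : Int) then (1 : Int) else 0) := by
  revert hs
  revert s
  decide

-- ===== VERDICT (by name: the statement is the Claim_ definition above) =====
theorem isDigitSumPalindrome_spec : Claim_equal_isDigitSumPalindrome := by
  intro N hDom hPre
  unfold Spec_isDigitSumPalindrome isDigitSumPalindrome isDigitSumPalindrome_alt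
  have hPre' : (0 : Int) ≤ N := hPre
  obtain ⟨m, rfl⟩ : ∃ m : Nat, N = (m : Int) := ⟨N.toNat, by omega⟩
  unfold Dom_isDigitSumPalindrome pvDomInt at hDom
  have hm : m ≤ 2147483648 := by
    have := of_decide_eq_true hDom; omega
  have htc : PySem.Int.toChars (m : Int) = Nat.toDigits 10 m := by
    simp [PySem.Int.toChars]
  simp only [htc, PySem.List.slice?_none_none_neg_one, Option.getD_some,
    foldl_toDigits_sum, Int.toNat_natCast]
  have hs : pvSumLoop (m + 1) (m : Int) 0 = ((Nat.digits 10 m).sum : Int) := by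
    rw [pvSumLoop_eq (m + 1) m 0 (by omega), zero_add]
  simp only [hs, Int.toNat_natCast]
  have hsum : (Nat.digits 10 m).sum < 91 := by
    have := digits_sum_le m hm; omega
  have htc2 : PySem.Int.toChars (((Nat.digits 10 m).sum : Nat) : Int)
      = Nat.toDigits 10 (Nat.digits 10 m).sum := by
    rw [PySem.Int.toChars, if_neg (by omega), Int.toNat_natCast]
  rw [htc2]
  exact pal_iff_rev _ hsum
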